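-- pv_equiv track=rewrite | github.com/ShraddhaAtreya/video-steganography-with-DNA-and-complex-frames | final/code1.py | fake_DNA_to_binary
-- ===== SOURCE A (Python) =====
-- reference_DNA = {'00': 'A', '01': 'T', '10': 'C', '11': 'G'}
--
-- def fake_DNA_to_binary(fake_DNA):
--     binary_string = ''
--     for char in fake_DNA:
--         for key, value in reference_DNA.items():
--             if value == char:
--                 binary_string += key
--                 break
--     return binary_string
-- ===== SOURCE B (Python) =====
-- def fake_DNA_to_binary(fake_DNA):
--     # Each letter encodes two independent bits: high bit = "is a strong base" (C/G),
--     # low bit = "is a keto base" (T/G).  A->00, T->01, C->10, G->11.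
--     return ''.join(
--         ('1' if ch in 'CG' else '0') + ('1' if ch in 'TG' else '0')
--         for ch in fake_DNA if ch in 'ATCG'
--     )
-- ===== Notes on version B (the rewrite author's own statement) =====
-- stated objective: faster
-- what changed: B eliminates the lookup table entirely: each 2-bit code is reconstructed bitwise from two independent membership tests (high bit = char in 'CG', low bit = char in 'TG') inside a single generator expression joined once, instead of scanning a binary->letter table per character with quadratic repeated string concatenation.
import Mathlib
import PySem

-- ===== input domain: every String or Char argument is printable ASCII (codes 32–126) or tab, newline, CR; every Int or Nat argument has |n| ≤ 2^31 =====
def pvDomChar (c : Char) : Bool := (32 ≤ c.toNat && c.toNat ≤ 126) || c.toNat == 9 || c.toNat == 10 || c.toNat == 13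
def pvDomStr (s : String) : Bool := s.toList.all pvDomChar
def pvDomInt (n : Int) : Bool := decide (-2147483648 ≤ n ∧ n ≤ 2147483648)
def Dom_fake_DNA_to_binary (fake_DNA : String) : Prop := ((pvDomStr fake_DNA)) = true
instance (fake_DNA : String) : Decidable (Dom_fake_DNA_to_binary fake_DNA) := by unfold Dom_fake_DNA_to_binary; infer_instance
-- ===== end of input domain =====

-- B drops the binary->letter lookup table: each 2-bit code is rebuilt bitwise from two
-- independent membership tests (high bit: C/G, low bit: T/G), joined once (idiomatic; same cost).

-- ===== PORT A =====
-- reference_DNA = {'00': 'A', '01': 'T', '10': 'C', '11': 'G'} as an association list (insertion order)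
def reference_DNA : List (String × Char) := [("00", 'A'), ("01", 'T'), ("10", 'C'), ("11", 'G')]

-- inner for-loop over reference_DNA.items() with break: first key whose value equals char, else nothing
def pvInnerA (c : Char) : List (String × Char) → String
  | [] => ""
  | (k, v) :: rest => if v == c then k else pvInnerA c rest

def fake_DNA_to_binary (fake_DNA : String) : String :=
  fake_DNA.toList.foldl (fun acc c => acc ++ pvInnerA c reference_DNA) ""

-- ===== PORT B =====
-- the two bit tests of Source B: high bit = ch in 'CG', low bit = ch in 'TG'
def pvHiBit (c : Char) : Char := if c ∈ "CG".toList then '1' else '0'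
def pvLoBit (c : Char) : Char := if c ∈ "TG".toList then '1' else '0'

-- ''.join(generator): filtered flatMap producing the two bit characters per kept letter
def fake_DNA_to_binary_alt (fake_DNA : String) : String :=
  String.ofList
    (fake_DNA.toList.flatMap fun c =>
      if c ∈ "ATCG".toList then [pvHiBit c, pvLoBit c] else [])

-- ===== PRECONDITION & SPEC =====
def Spec_fake_DNA_to_binary (fake_DNA : String) (out : String) : Prop := out = fake_DNA_to_binary_alt fake_DNA
instance (fake_DNA : String) (out : String) : Decidable (Spec_fake_DNA_to_binary fake_DNA out) := by unfold Spec_fake_DNA_to_binary; infer_instance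

-- ===== CLAIM (what is proved, stated in full; the proofs are below) =====
def Claim_equal_fake_DNA_to_binary : Prop := ∀ (fake_DNA : String), Dom_fake_DNA_to_binary fake_DNA → Spec_fake_DNA_to_binary fake_DNA (fake_DNA_to_binary fake_DNA)

-- ===== LEMMAS AND PROOFS =====

-- per-character agreement: A's table-scan piece equals B's two reconstructed bits (or [] when skipped)
theorem pv_step_eq (c : Char) :
    (pvInnerA c reference_DNA).toList =
      (if c ∈ "ATCG".toList then [pvHiBit c, pvLoBit c] else []) := by
  by_cases hA : c = 'A'
  · subst hA; decide
  by_cases hT : c = 'T'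
  · subst hT; decide
  by_cases hC : c = 'C'
  · subst hC; decide
  by_cases hG : c = 'G'
  · subst hG; decide
  · have hmem : c ∉ "ATCG".toList := by
      have : "ATCG".toList = ['A', 'T', 'C', 'G'] := by decide
      rw [this]; simp [hA, hT, hC, hG]
    rw [if_neg hmem]
    simp only [reference_DNA, pvInnerA]
    rw [if_neg (by simpa using fun h => hA h.symm),
        if_neg (by simpa using fun h => hT h.symm),
        if_neg (by simpa using fun h => hC h.symm),
        if_neg (by simpa using fun h => hG h.symm)]
    decide

-- A's left fold over the string, viewed as chars: accumulator followed by B's flatMap of the rest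
theorem pv_fold_eq (cs : List Char) (acc : String) :
    (cs.foldl (fun a c => a ++ pvInnerA c reference_DNA) acc).toList =
      acc.toList ++ (cs.flatMap fun c =>
        if c ∈ "ATCG".toList then [pvHiBit c, pvLoBit c] else []) := by
  induction cs generalizing acc with
  | nil => simp
  | cons c rest ih =>
    simp only [List.foldl_cons, List.flatMap_cons]
    rw [ih, String.toList_append, pv_step_eq c, List.append_assoc]

-- ===== VERDICT (by name: the statement is the Claim_ definition above) =====
theorem fake_DNA_to_binary_spec : Claim_equal_fake_DNA_to_binary := by
  intro s _
  unfold Spec_fake_DNA_to_binary fake_DNA_to_binary fake_DNA_to_binary_alt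
  apply String.toList_inj.mp
  rw [pv_fold_eq s.toList ""]
  exact String.toList_ofList.symm
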